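-- pv_equiv track=rewrite | github.com/ccxx83100/my_testcode | code_test12.py | tex_mix
-- ===== SOURCE A (Python) =====
-- def tex_mix(main_t, add_t):
--     txa_len = len(add_t)
--     txm_len = len(main_t)
--     mix_point = 0
--
--     for i in range(txa_len):
--         tx_m = main_t[txm_len-i-1:txm_len]
--         tx_a = add_t[0:i+1]
--         if tx_m == tx_a:
--             mix_point = i+1
--
--     out_t = main_t + add_t[mix_point:txa_len]
--     return out_t
-- ===== SOURCE B (Python) =====
-- def tex_mix(main_t, add_t):
--     m = len(add_t)
--     if m == 0:
--         return main_t
--     # KMP prefix function of add_t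
--     pi = [0] * m
--     k = 0
--     for i in range(1, m):
--         while k > 0 and add_t[i] != add_t[k]:
--             k = pi[k - 1]
--         if add_t[i] == add_t[k]:
--             k += 1
--         pi[i] = k
--     # run the KMP automaton of add_t over main_t; final state = overlap length
--     k = 0
--     for c in main_t:
--         if k == m:
--             k = pi[k - 1]
--         while k > 0 and c != add_t[k]:
--             k = pi[k - 1]
--         if c == add_t[k]:
--             k += 1
--     return main_t + add_t[k:]
-- ===== Notes on version B (the rewrite author's own statement) =====
-- stated objective: faster
-- what changed: Replaces A's try-every-overlap-length scan (each step comparing length-(i+1) slices) by the KMP prefix-function automaton of add_t run once over main_t, whose final state is the overlap length.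
import Mathlib
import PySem

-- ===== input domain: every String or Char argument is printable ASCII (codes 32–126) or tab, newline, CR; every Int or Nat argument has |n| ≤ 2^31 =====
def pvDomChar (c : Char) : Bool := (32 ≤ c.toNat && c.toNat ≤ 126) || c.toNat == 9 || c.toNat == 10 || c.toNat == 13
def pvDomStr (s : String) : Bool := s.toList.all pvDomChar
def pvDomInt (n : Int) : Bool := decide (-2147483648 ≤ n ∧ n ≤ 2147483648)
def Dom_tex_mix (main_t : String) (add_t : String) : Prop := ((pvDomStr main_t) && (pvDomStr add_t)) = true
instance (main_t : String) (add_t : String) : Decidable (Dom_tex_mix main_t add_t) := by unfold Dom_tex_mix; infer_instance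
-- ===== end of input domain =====

-- B replaces A's quadratic try-every-overlap scan by a linear KMP prefix-function automaton (objective: faster, asymptotic).

-- ===== PORT A =====
-- Literal transliteration of A: for each i, compare the length-(i+1) tail slice of main_t
-- (Python slice semantics, including a negative start) with the length-(i+1) head slice of add_t.
def tex_mix (main_t : String) (add_t : String) : String :=
  let s := main_t.toList
  let p := add_t.toList
  let txa_len : Int := PySem.Chars.len p
  let txm_len : Int := PySem.Chars.len s
  let mix_point : Int :=
    (PySem.List.pyRange 0 txa_len 1).foldl (fun mp i =>
      let tx_m := PySem.List.slice s (some (txm_len - i - 1)) (some txm_len)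
      let tx_a := PySem.List.slice p (some 0) (some (i + 1))
      if tx_m = tx_a then i + 1 else mp) 0
  String.ofList (s ++ PySem.List.slice p (some mix_point) (some txa_len))

-- ===== PORT B =====
-- The `while k > 0 and c != add_t[k]: k = pi[k-1]` loop of Source B; `fuel` only makes the
-- recursion structural: k strictly decreases each pass (pi[j] ≤ j, proved below), so
-- fuel = initial k is enough and the result is exactly the Python loop's final k.
-- List reads use getD: every reachable index is in range (proved below), so this is exact.
def kmpFall (p : List Char) (pi : List Nat) (c : Char) : Nat → Nat → Nat
  | 0, k => k
  | fuel + 1, k =>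
    if k ≠ 0 ∧ p.getD k default ≠ c then kmpFall p pi c fuel (pi.getD (k - 1) 0) else k

-- Literal transliteration of Source B: build the KMP prefix function of add_t, then run the
-- automaton over main_t; the final state k is the overlap length.
def tex_mix_alt (main_t : String) (add_t : String) : String :=
  let p := add_t.toList
  let m := p.length
  if m = 0 then main_t
  else
    let st := (List.range' 1 (m - 1)).foldl (fun (st : List Nat × Nat) i =>
        let k := kmpFall p st.1 (p.getD i default) st.2 st.2
        let k := if p.getD i default = p.getD k default then k + 1 else k
        (st.1.set i k, k)) (List.replicate m 0, 0)
    let pi := st.1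
    let k := main_t.toList.foldl (fun k c =>
        let k := if k = m then pi.getD (k - 1) 0 else k
        let k := kmpFall p pi c k k
        if c = p.getD k default then k + 1 else k) 0
    String.ofList (main_t.toList ++ p.drop k)

-- ===== PRECONDITION & SPEC =====
def Spec_tex_mix (main_t : String) (add_t : String) (out : String) : Prop := out = tex_mix_alt main_t add_t
instance (main_t : String) (add_t : String) (out : String) : Decidable (Spec_tex_mix main_t add_t out) := by unfold Spec_tex_mix; infer_instance

-- ===== CLAIM (what is proved, stated in full; the proofs are below) =====
def Claim_equal_tex_mix : Prop := ∀ (main_t : String) (add_t : String), Dom_tex_mix main_t add_t → Spec_tex_mix main_t add_t (tex_mix main_t add_t)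

-- ===== LEMMAS AND PROOFS =====

-- j is an overlap candidate: the length-j prefix of p is a suffix of t.
def pvCand (p t : List Char) (j : ℕ) : Prop := j ≤ p.length ∧ p.take j <:+ t

-- k is THE overlap of t with p (the largest candidate).
def pvIsOv (p t : List Char) (k : ℕ) : Prop := pvCand p t k ∧ ∀ j, pvCand p t j → j ≤ k

-- k is the longest proper border of p.take i.
def pvIsLpb (p : List Char) (i k : ℕ) : Prop :=
  k < i ∧ p.take k <:+ p.take i ∧ ∀ j, j < i → p.take j <:+ p.take i → j ≤ k

-- the two foldl bodies of tex_mix_alt, named for the proofs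
def pvPiFold (p : List Char) (i : ℕ) : List Nat × Nat :=
  (List.range' 1 (i - 1)).foldl (fun (st : List Nat × Nat) j =>
    let k := kmpFall p st.1 (p.getD j default) st.2 st.2
    let k := if p.getD j default = p.getD k default then k + 1 else k
    (st.1.set j k, k)) (List.replicate p.length 0, 0)

def pvStep (p : List Char) (pi : List Nat) (k : ℕ) (c : Char) : ℕ :=
  let k := if k = p.length then pi.getD (k - 1) 0 else k
  let k := kmpFall p pi c k k
  if c = p.getD k default then k + 1 else k

lemma pvCand_zero (p t : List Char) : pvCand p t 0 := by
  simp [pvCand]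

lemma pvIsOv_unique {p t : List Char} {k k' : ℕ} (h : pvIsOv p t k) (h' : pvIsOv p t k') : k = k' := by
  exact Nat.le_antisymm (h'.2 _ h.1) (h.2 _ h'.1)

lemma pv_suffix_of_suffix_le {l1 l2 t : List Char} (h1 : l1 <:+ t) (h2 : l2 <:+ t)
    (h : l1.length ≤ l2.length) : l1 <:+ l2 := by
  rw [← List.reverse_prefix] at h1 h2 ⊢
  exact List.prefix_of_prefix_length_le h1 h2 (by simpa using h)

-- a smaller candidate is a border of a larger candidate's prefix
lemma pvCand_border {p t : List Char} {j k : ℕ} (hj : pvCand p t j) (hk : pvCand p t k)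
    (hjk : j ≤ k) : p.take j <:+ p.take k := by
  exact pv_suffix_of_suffix_le hj.2 hk.2 (by simp [List.length_take]; omega)

-- candidate extension by one character
lemma pvCand_snoc {p t : List Char} {c : Char} {j : ℕ} :
    pvCand p (t ++ [c]) (j + 1) ↔ pvCand p t j ∧ j < p.length ∧ p.getD j default = c := by
  constructor
  · rintro ⟨hj1, hsuf⟩
    have hjlt : j < p.length := by omega
    have htake : p.take (j + 1) = p.take j ++ [p.getD j default] := by
      rw [List.take_add_one, List.getD_eq_getElem _ _ hjlt]
      simp [List.getElem?_eq_getElem hjlt]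
    rw [htake, ← List.reverse_prefix] at hsuf
    simp only [List.reverse_append, List.reverse_cons, List.reverse_nil, List.nil_append,
      List.cons_append, List.cons_prefix_cons] at hsuf
    refine ⟨⟨by omega, ?_⟩, hjlt, hsuf.1⟩
    rw [← List.reverse_prefix]
    exact hsuf.2
  · rintro ⟨⟨hj1, hsuf⟩, hjlt, hc⟩
    have htake : p.take (j + 1) = p.take j ++ [p.getD j default] := by
      rw [List.take_add_one, List.getD_eq_getElem _ _ hjlt]
      simp [List.getElem?_eq_getElem hjlt]
    refine ⟨by omega, ?_⟩
    rw [htake, ← List.reverse_prefix]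
    simp only [List.reverse_append, List.reverse_cons, List.reverse_nil, List.nil_append,
      List.cons_append, List.cons_prefix_cons]
    exact ⟨hc, by rw [List.reverse_prefix]; exact hsuf⟩

-- the while loop descends the border chain; result is the largest candidate j ≤ k0 with p[j] = c
lemma kmpFall_spec (p t : List Char) (pi : List Nat) (c : Char) :
    ∀ fuel k0, k0 ≤ fuel → k0 < p.length → pvCand p t k0 →
    (∀ idx, idx < k0 → pvIsLpb p (idx + 1) (pi.getD idx 0)) →
    pvCand p t (kmpFall p pi c fuel k0) ∧ kmpFall p pi c fuel k0 ≤ k0 ∧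
    (kmpFall p pi c fuel k0 = 0 ∨ p.getD (kmpFall p pi c fuel k0) default = c) ∧
    (∀ j, j ≤ k0 → j < p.length → pvCand p t j → p.getD j default = c →
      j ≤ kmpFall p pi c fuel k0) := by
  intro fuel
  induction fuel with
  | zero =>
    intro k0 hf hk hcand hpi
    have h0 : k0 = 0 := by omega
    subst h0
    exact ⟨hcand, le_refl _, Or.inl rfl, fun j hj _ _ _ => hj⟩
  | succ fuel ih =>
    intro k0 hf hk hcand hpi
    by_cases hcond : k0 ≠ 0 ∧ p.getD k0 default ≠ c
    · have hstep : kmpFall p pi c (fuel + 1) k0 = kmpFall p pi c fuel (pi.getD (k0 - 1) 0) := by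
        simp only [kmpFall, if_pos hcond]
      have hlpb := hpi (k0 - 1) (by omega)
      rw [Nat.sub_add_cancel (Nat.pos_of_ne_zero hcond.1)] at hlpb
      have hk1lt : pi.getD (k0 - 1) 0 < k0 := hlpb.1
      have hcand1 : pvCand p t (pi.getD (k0 - 1) 0) :=
        ⟨by omega, hlpb.2.1.trans hcand.2⟩
      have hres := ih (pi.getD (k0 - 1) 0) (by omega) (by omega) hcand1
        (fun idx hidx => hpi idx (by omega))
      rw [hstep]
      refine ⟨hres.1, le_trans hres.2.1 (le_of_lt hk1lt), hres.2.2.1, ?_⟩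
      intro j hj hjm hcj hcc
      have hjne : j ≠ k0 := by
        intro h; exact hcond.2 (h ▸ hcc)
      have hjb : p.take j <:+ p.take k0 := pvCand_border hcj hcand hj
      exact hres.2.2.2 j (hlpb.2.2 j (by omega) hjb) hjm hcj hcc
    · have hstep : kmpFall p pi c (fuel + 1) k0 = k0 := by
        simp only [kmpFall, if_neg hcond]
      rw [hstep]
      refine ⟨hcand, le_refl _, ?_, fun j hj _ _ _ => hj⟩
      by_cases h0 : k0 = 0
      · exact Or.inl h0
      · right
        by_contra hne
        exact hcond ⟨h0, hne⟩

-- the prefix-function building loop is correct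
lemma pvPi_loop (p : List Char) (hm : 0 < p.length) :
    ∀ i, 1 ≤ i → i ≤ p.length →
    (pvPiFold p i).1.length = p.length ∧
    (∀ idx, idx < i → pvIsLpb p (idx + 1) ((pvPiFold p i).1.getD idx 0)) ∧
    (pvPiFold p i).2 = (pvPiFold p i).1.getD (i - 1) 0 := by
  intro i hi
  induction i, hi using Nat.le_induction with
  | base =>
    intro _
    have h1 : pvPiFold p 1 = (List.replicate p.length 0, 0) := by
      simp [pvPiFold]
    rw [h1]
    refine ⟨by simp, ?_, by simp⟩
    intro idx hidx
    have hidx0 : idx = 0 := by omega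
    subst hidx0
    have hrep : (List.replicate p.length (0 : ℕ)).getD 0 0 = 0 := by
      simp [List.getD_eq_getElem?_getD, hm]
    rw [hrep]
    exact ⟨by omega, List.nil_suffix, fun j hj _ => by omega⟩
  | succ i hi1 ih =>
    intro hi2
    have him : i < p.length := by omega
    obtain ⟨ihlen, ihok, ihsnd⟩ := ih (by omega)
    -- unroll one step of the fold
    have hrange : List.range' 1 ((i + 1) - 1) = List.range' 1 (i - 1) ++ [i] := by
      have h1 : (i + 1) - 1 = (i - 1) + 1 := by omega
      rw [h1, List.range'_concat]
      congr 2
      omega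
    have hfold : pvPiFold p (i + 1) =
        ((pvPiFold p i).1.set i
          (if p.getD i default =
              p.getD (kmpFall p (pvPiFold p i).1 (p.getD i default) (pvPiFold p i).2
                (pvPiFold p i).2) default
            then kmpFall p (pvPiFold p i).1 (p.getD i default) (pvPiFold p i).2
                (pvPiFold p i).2 + 1
            else kmpFall p (pvPiFold p i).1 (p.getD i default) (pvPiFold p i).2
                (pvPiFold p i).2),
         (if p.getD i default =
              p.getD (kmpFall p (pvPiFold p i).1 (p.getD i default) (pvPiFold p i).2
                (pvPiFold p i).2) default
            then kmpFall p (pvPiFold p i).1 (p.getD i default) (pvPiFold p i).2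
                (pvPiFold p i).2 + 1
            else kmpFall p (pvPiFold p i).1 (p.getD i default) (pvPiFold p i).2
                (pvPiFold p i).2)) := by
      conv_lhs => rw [pvPiFold, hrange, List.foldl_append]
      rfl
    set st := pvPiFold p i with hst
    set k0 := st.2 with hk0
    -- the incoming k0 is the longest proper border of p.take i
    have hlpb0 : pvIsLpb p i k0 := by
      have h := ihok (i - 1) (by omega)
      rw [Nat.sub_add_cancel (by omega)] at h
      rw [ihsnd]
      exact h
    have hk0i : k0 < i := hlpb0.1
    have hcand0 : pvCand p (p.take i) k0 := ⟨by omega, hlpb0.2.1⟩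
    have hfall := kmpFall_spec p (p.take i) st.1 (p.getD i default) k0 k0 (le_refl _)
      (by omega) hcand0 (fun idx hidx => ihok idx (by omega))
    set c := p.getD i default with hc
    set r := kmpFall p st.1 c k0 k0 with hr
    obtain ⟨hcr, hrle, hexit, hmax⟩ := hfall
    have hrm : r < p.length := by omega
    set k2 := if c = p.getD r default then r + 1 else r with hk2
    -- p.take (i+1) = p.take i ++ [c]
    have htake : p.take (i + 1) = p.take i ++ [c] := by
      rw [List.take_add_one, hc, List.getD_eq_getElem _ _ him]
      simp [List.getElem?_eq_getElem him]
    -- k2 is the longest proper border of p.take (i+1)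
    have hlpb2 : pvIsLpb p (i + 1) k2 := by
      rw [hk2]
      by_cases hcc : c = p.getD r default
      · rw [if_pos hcc]
        have hcandr1 : pvCand p (p.take i ++ [c]) (r + 1) :=
          pvCand_snoc.mpr ⟨hcr, hrm, hcc.symm⟩
        refine ⟨by omega, by rw [htake]; exact hcandr1.2, ?_⟩
        intro j hj hsuf
        cases j with
        | zero => omega
        | succ j' =>
          have hcj : pvCand p (p.take i ++ [c]) (j' + 1) :=
            ⟨by omega, by rw [← htake]; exact hsuf⟩
          obtain ⟨hcj', hj'm, hcc'⟩ := pvCand_snoc.mp hcj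
          have hj'k0 : j' ≤ k0 := hlpb0.2.2 j' (by omega) hcj'.2
          have := hmax j' hj'k0 hj'm hcj' hcc'
          omega
      · rw [if_neg hcc]
        have hr0 : r = 0 := by
          rcases hexit with h | h
          · exact h
          · exact absurd h.symm hcc
        refine ⟨by omega, ?_, ?_⟩
        · rw [hr0, List.take_zero]
          exact List.nil_suffix
        · intro j hj hsuf
          cases j with
          | zero => omega
          | succ j' =>
            have hcj : pvCand p (p.take i ++ [c]) (j' + 1) :=
              ⟨by omega, by rw [← htake]; exact hsuf⟩
            obtain ⟨hcj', hj'm, hcc'⟩ := pvCand_snoc.mp hcj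
            have hj'k0 : j' ≤ k0 := hlpb0.2.2 j' (by omega) hcj'.2
            have hj'r : j' ≤ r := hmax j' hj'k0 hj'm hcj' hcc'
            rw [hr0] at hj'r
            interval_cases j'
            exact absurd hcc'.symm (hr0 ▸ hcc)
    -- put the step back together
    rw [hfold]
    refine ⟨by simpa using ihlen, ?_, ?_⟩
    · intro idx hidx
      rcases Nat.lt_succ_iff_lt_or_eq.mp hidx with h | h
      · have hne : idx ≠ i := by omega
        have : (st.1.set i k2).getD idx 0 = st.1.getD idx 0 := by
          rw [List.getD_eq_getElem?_getD, List.getD_eq_getElem?_getD,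
            List.getElem?_set_ne (by omega)]
        rw [this]
        exact ihok idx h
      · subst h
        have : (st.1.set idx k2).getD idx 0 = k2 := by
          rw [List.getD_eq_getElem?_getD, List.getElem?_set_self (by omega)]
          rfl
        rw [this]
        exact hlpb2
    · have : (st.1.set i k2).getD ((i + 1) - 1) 0 = k2 := by
        have h1 : (i + 1) - 1 = i := by omega
        rw [h1, List.getD_eq_getElem?_getD, List.getElem?_set_self (by omega)]
        rfl
      rw [this]

-- one automaton step preserves "k is the overlap"
lemma pvScan_step (p : List Char) (pi : List Nat) (hm : 0 < p.length)
    (hpi : ∀ idx, idx < p.length → pvIsLpb p (idx + 1) (pi.getD idx 0))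
    (t : List Char) (k : ℕ) (c : Char) (hov : pvIsOv p t k) (hk : k ≤ p.length) :
    pvIsOv p (t ++ [c]) (pvStep p pi k c) ∧ pvStep p pi k c ≤ p.length := by
  have hm1 : p.length - 1 + 1 = p.length := by omega
  have hunf : pvStep p pi k c =
      (if c = p.getD (kmpFall p pi c (if k = p.length then pi.getD (k - 1) 0 else k)
            (if k = p.length then pi.getD (k - 1) 0 else k)) default
       then kmpFall p pi c (if k = p.length then pi.getD (k - 1) 0 else k)
              (if k = p.length then pi.getD (k - 1) 0 else k) + 1
       else kmpFall p pi c (if k = p.length then pi.getD (k - 1) 0 else k)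
              (if k = p.length then pi.getD (k - 1) 0 else k)) := rfl
  rw [hunf]
  set k1 := if k = p.length then pi.getD (k - 1) 0 else k with hk1def
  have hk1 : k1 < p.length ∧ pvCand p t k1 ∧
      (∀ j, pvCand p t j → j < p.length → j ≤ k1) := by
    by_cases hkm : k = p.length
    · rw [hk1def, if_pos hkm]
      have hlpb := hpi (p.length - 1) (by omega)
      rw [hm1] at hlpb
      subst hkm
      refine ⟨hlpb.1, ⟨le_of_lt hlpb.1, hlpb.2.1.trans hov.1.2⟩, ?_⟩
      intro j hcj hjlt
      exact hlpb.2.2 j hjlt (pvCand_border hcj hov.1 (hov.2 j hcj))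
    · rw [hk1def, if_neg hkm]
      exact ⟨lt_of_le_of_ne hk hkm, hov.1, fun j hcj _ => hov.2 j hcj⟩
  obtain ⟨hk1lt, hk1cand, hk1max⟩ := hk1
  have hfall := kmpFall_spec p t pi c k1 k1 (le_refl _) hk1lt hk1cand
    (fun idx hidx => hpi idx (by omega))
  set k2 := kmpFall p pi c k1 k1 with hk2def
  obtain ⟨hc2, hle2, hexit2, hmax2⟩ := hfall
  have hk2lt : k2 < p.length := lt_of_le_of_lt hle2 hk1lt
  by_cases hcc : c = p.getD k2 default
  · rw [if_pos hcc]
    refine ⟨⟨pvCand_snoc.mpr ⟨hc2, hk2lt, hcc.symm⟩, ?_⟩, by omega⟩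
    intro j hcj
    cases j with
    | zero => omega
    | succ j' =>
      obtain ⟨hcj', hj'm, hcc'⟩ := pvCand_snoc.mp hcj
      have := hmax2 j' (hk1max j' hcj' hj'm) hj'm hcj' hcc'
      omega
  · rw [if_neg hcc]
    have hk20 : k2 = 0 := by
      rcases hexit2 with h | h
      · exact h
      · exact absurd h.symm hcc
    rw [hk20]
    refine ⟨⟨pvCand_zero p _, ?_⟩, by omega⟩
    intro j hcj
    cases j with
    | zero => omega
    | succ j' =>
      obtain ⟨hcj', hj'm, hcc'⟩ := pvCand_snoc.mp hcj
      have hj'0 : j' ≤ 0 := hk20 ▸ hmax2 j' (hk1max j' hcj' hj'm) hj'm hcj' hcc'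
      have : j' = 0 := by omega
      subst this
      exact absurd hcc'.symm (hk20 ▸ hcc)

-- the automaton run over all of main_t computes the overlap
lemma pvScan_loop (p : List Char) (pi : List Nat) (hm : 0 < p.length)
    (hpi : ∀ idx, idx < p.length → pvIsLpb p (idx + 1) (pi.getD idx 0)) (s : List Char) :
    pvIsOv p s (s.foldl (pvStep p pi) 0) := by
  have base0 : pvIsOv p [] 0 := by
    refine ⟨pvCand_zero p [], ?_⟩
    rintro j ⟨hj1, hsuf⟩
    rcases List.take_eq_nil_iff.mp (List.suffix_nil.mp hsuf) with h | h
    · omega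
    · subst h
      simpa using hj1
  suffices h : ∀ rest u k, pvIsOv p u k → k ≤ p.length →
      pvIsOv p (u ++ rest) (rest.foldl (pvStep p pi) k) by
    simpa using h s [] 0 base0 (by omega)
  intro rest
  induction rest with
  | nil =>
    intro u k h hk
    simpa using h
  | cons c rest ih =>
    intro u k h hk
    have hstep := pvScan_step p pi hm hpi u k c h hk
    have := ih (u ++ [c]) _ hstep.1 hstep.2
    rw [List.append_cons, List.foldl_cons]
    exact this

-- A's slice comparison at index i succeeds iff i+1 is a candidate
lemma pvSlice_cond (p s : List Char) (i : ℕ) (hi : i < p.length) :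
    (PySem.List.slice s (some ((s.length : Int) - (i : Int) - 1)) (some (s.length : Int)) =
      PySem.List.slice p (some 0) (some ((i : Int) + 1))) ↔ pvCand p s (i + 1) := by
  have hrhs : PySem.List.slice p (some (0 : Int)) (some ((i : Int) + 1)) = p.take (i + 1) := by
    have h1 : ((i : Int) + 1) = (((i + 1 : ℕ) : Int)) := by push_cast; ring
    rw [h1, show (0 : Int) = (((0 : ℕ) : Int)) from rfl, PySem.List.slice_natCast]
    simp
  rw [hrhs]
  have hlt : (p.take (i + 1)).length = i + 1 := by rw [List.length_take]; omega
  by_cases hin : i + 1 ≤ s.length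
  · have ha : (s.length : Int) - (i : Int) - 1 = (((s.length - (i + 1) : ℕ) : Int)) := by omega
    rw [ha, show ((s.length : Int)) = (((s.length : ℕ) : Int)) from rfl, PySem.List.slice_natCast]
    have h2 : s.length - (s.length - (i + 1)) = i + 1 := by omega
    rw [h2]
    have h3 : (s.drop (s.length - (i + 1))).take (i + 1) = s.drop (s.length - (i + 1)) :=
      List.take_of_length_le (by rw [List.length_drop]; omega)
    rw [h3]
    constructor
    · intro heq
      refine ⟨by omega, ?_⟩
      rw [List.suffix_iff_eq_drop, hlt]
      exact heq.symm
    · rintro ⟨h1, hsuf⟩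
      rw [List.suffix_iff_eq_drop, hlt] at hsuf
      exact hsuf.symm
  · constructor
    · intro heq
      exfalso
      have hlen := congrArg List.length heq
      rw [PySem.List.length_slice, hlt] at hlen
      have h2 := PySem.List.clampIdx_le s.length ((s.length : Int))
      omega
    · rintro ⟨h1, hsuf⟩
      have := hsuf.length_le
      rw [hlt] at this
      omega

-- A's scan computes the overlap
lemma pvA_loop (p s : List Char) :
    ∃ g : ℕ, ((PySem.List.pyRange 0 (PySem.Chars.len p) 1).foldl (fun mp i =>
        if PySem.List.slice s (some (PySem.Chars.len s - i - 1)) (some (PySem.Chars.len s)) =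
            PySem.List.slice p (some 0) (some (i + 1)) then i + 1 else mp) 0) = (g : Int) ∧
      pvIsOv p s g ∧ g ≤ p.length := by
  have hlenp : PySem.Chars.len p = ((p.length : ℕ) : Int) := by simp
  have hlens : PySem.Chars.len s = ((s.length : ℕ) : Int) := by simp
  rw [hlenp, hlens, PySem.List.pyRange_zero_natCast, List.foldl_map]
  have main : ∀ r, r ≤ p.length → ∃ g : ℕ,
      ((List.range r).foldl (fun (mp : Int) (k : ℕ) =>
        if PySem.List.slice s (some ((s.length : Int) - (k : Int) - 1)) (some ((s.length : ℕ) : Int)) =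
            PySem.List.slice p (some 0) (some ((k : Int) + 1)) then (k : Int) + 1 else mp) 0) = (g : Int) ∧
      pvCand p s g ∧ g ≤ r ∧ (∀ j, j ≤ r → pvCand p s j → j ≤ g) := by
    intro r
    induction r with
    | zero =>
      intro _
      exact ⟨0, by simp, pvCand_zero p s, le_refl _, fun j hj _ => by omega⟩
    | succ r ih =>
      intro hr
      obtain ⟨g, hfold, hcg, hgr, hmax⟩ := ih (by omega)
      rw [List.range_succ, List.foldl_append, List.foldl_cons, List.foldl_nil, hfold]
      by_cases hc : pvCand p s (r + 1)
      · have hcond := (pvSlice_cond p s r (by omega)).mpr hc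
        rw [if_pos hcond]
        exact ⟨r + 1, by push_cast; ring, hc, le_refl _, fun j hj _ => by omega⟩
      · have hcond := (pvSlice_cond p s r (by omega))
        rw [if_neg (fun h => hc (hcond.mp h))]
        refine ⟨g, rfl, hcg, by omega, ?_⟩
        intro j hj hcj
        rcases Nat.lt_succ_iff_lt_or_eq.mp (Nat.lt_succ_of_le hj) with h | h
        · exact hmax j (by omega) hcj
        · subst h
          exact absurd hcj hc
  obtain ⟨g, hfold, hcg, hgr, hmax⟩ := main p.length (le_refl _)
  exact ⟨g, hfold, ⟨hcg, fun j hcj => hmax j hcj.1 hcj⟩, by omega⟩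

-- ===== VERDICT (by name: the statement is the Claim_ definition above) =====
theorem tex_mix_spec : Claim_equal_tex_mix := by
  intro main_t add_t _
  unfold Spec_tex_mix
  obtain ⟨g, hgA, hgOv, hgle⟩ := pvA_loop add_t.toList main_t.toList
  have hA : tex_mix main_t add_t = String.ofList (main_t.toList ++
      PySem.List.slice add_t.toList (some ((g : ℕ) : Int))
        (some (PySem.Chars.len add_t.toList))) := by
    simp only [tex_mix]
    rw [hgA]
  have hslice : PySem.List.slice add_t.toList (some ((g : ℕ) : Int))
      (some (PySem.Chars.len add_t.toList)) = add_t.toList.drop g := by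
    rw [show PySem.Chars.len add_t.toList = ((add_t.toList.length : ℕ) : Int) by simp,
      PySem.List.slice_natCast]
    exact List.take_of_length_le (by rw [List.length_drop])
  by_cases hm0 : add_t.toList.length = 0
  · have hp : add_t.toList = [] := List.eq_nil_of_length_eq_zero hm0
    have hB : tex_mix_alt main_t add_t = main_t := by
      simp only [tex_mix_alt]
      rw [if_pos hm0]
    rw [hA, hslice, hB, hp]
    simp [String.ofList_toList]
  · have hmpos : 0 < add_t.toList.length := Nat.pos_of_ne_zero hm0
    have hpi := pvPi_loop add_t.toList hmpos add_t.toList.length (by omega) (le_refl _)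
    have hscan := pvScan_loop add_t.toList
      (pvPiFold add_t.toList add_t.toList.length).1 hmpos hpi.2.1 main_t.toList
    have hkg : main_t.toList.foldl
        (pvStep add_t.toList (pvPiFold add_t.toList add_t.toList.length).1) 0 = g :=
      pvIsOv_unique hscan hgOv
    have hB : tex_mix_alt main_t add_t = String.ofList (main_t.toList ++
        add_t.toList.drop (main_t.toList.foldl
          (pvStep add_t.toList (pvPiFold add_t.toList add_t.toList.length).1) 0)) := by
      simp only [tex_mix_alt]
      rw [if_neg hm0]
      rfl
    rw [hA, hslice, hB, hkg]
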